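-- pv_equiv track=rewrite | github.com/Richicinschi/python-oop-journey | python-oop-journey-v2/week00_getting_started/solutions/day10/problem_04_skip_multiples.py | skip_multiples
-- ===== SOURCE A (Python) =====
-- def skip_multiples(n: int, k: int) -> int:
--     """Sum numbers from 1 to n, skipping multiples of k.
--
--     Args:
--         n: Upper bound (inclusive)
--         k: Multiple to skip
--
--     Returns:
--         Sum of numbers from 1 to n, excluding multiples of k
--     """
--     total = 0
--     current = 1
--     while current <= n:
--         if current % k == 0:
--             current += 1
--             continue
--         total += current
--         current += 1
--     return total
-- ===== SOURCE B (Python) =====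
-- def skip_multiples(n: int, k: int) -> int:
--     """Sum numbers from 1 to n, skipping multiples of k (closed form)."""
--     if n < 1:
--         return 0
--     q = n // abs(k)
--     return n * (n + 1) // 2 - abs(k) * (q * (q + 1) // 2)
-- ===== Notes on version B (the rewrite author's own statement) =====
-- stated objective: faster
-- what changed: Replaces the 1..n loop by the closed form n(n+1)/2 - |k|*q(q+1)/2 with q = n//|k|.
import Mathlib
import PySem

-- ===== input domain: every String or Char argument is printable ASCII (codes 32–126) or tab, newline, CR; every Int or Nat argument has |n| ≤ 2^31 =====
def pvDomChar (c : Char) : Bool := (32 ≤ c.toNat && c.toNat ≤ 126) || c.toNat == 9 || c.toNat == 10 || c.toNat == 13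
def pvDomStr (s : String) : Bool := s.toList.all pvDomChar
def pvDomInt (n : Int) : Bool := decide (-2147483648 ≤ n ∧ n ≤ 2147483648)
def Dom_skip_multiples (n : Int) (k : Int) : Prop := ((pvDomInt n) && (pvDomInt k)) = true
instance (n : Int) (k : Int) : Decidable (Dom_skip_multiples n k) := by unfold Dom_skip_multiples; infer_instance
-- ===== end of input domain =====

-- B replaces A's 1..n loop by the closed form n(n+1)/2 - |k|*q(q+1)/2 with q = n//|k| (O(1) instead of O(n)).

-- ===== PORT A =====
-- while current <= n: skip multiples of k, else accumulate
def skipLoop (n k : Int) (current : Int) (total : Int) : Int :=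
  if _h : current ≤ n then
    if PySem.Int.mod current k = 0 then
      skipLoop n k (current + 1) total
    else
      skipLoop n k (current + 1) (total + current)
  else total
termination_by (n + 1 - current).toNat
decreasing_by all_goals omega

def skip_multiples (n : Int) (k : Int) : Int := skipLoop n k 1 0

-- ===== PORT B =====
def skip_multiples_alt (n : Int) (k : Int) : Int :=
  if n < 1 then 0
  else
    let q := PySem.Int.floordiv n |k|
    PySem.Int.floordiv (n * (n + 1)) 2 - |k| * PySem.Int.floordiv (q * (q + 1)) 2

-- ===== PRECONDITION & SPEC =====
-- Pre_ excludes exactly the inputs where A raises ZeroDivisionError (k = 0 with the loop entered, i.e. n ≥ 1); B raises there too.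
def Pre_skip_multiples (n : Int) (k : Int) : Prop := k ≠ 0 ∨ n < 1
instance (n : Int) (k : Int) : Decidable (Pre_skip_multiples n k) := by unfold Pre_skip_multiples; infer_instance
def pvWitness_skip_multiples : Int × Int := (10, 3)

def Spec_skip_multiples (n : Int) (k : Int) (out : Int) : Prop := out = skip_multiples_alt n k
instance (n : Int) (k : Int) (out : Int) : Decidable (Spec_skip_multiples n k out) := by unfold Spec_skip_multiples; infer_instance

-- ===== CLAIM (what is proved, stated in full; the proofs are below) =====
def Claim_equal_skip_multiples : Prop := ∀ (n : Int) (k : Int), Dom_skip_multiples n k → Pre_skip_multiples n k → Spec_skip_multiples n k (skip_multiples n k)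

-- ===== LEMMAS AND PROOFS =====

-- closed form used by the proof, written with Lean's Euclidean / (all operands are ≥ 0 where it is used)
def pvF (k x : Int) : Int :=
  x * (x + 1) / 2 - |k| * ((x / |k|) * (x / |k| + 1) / 2)

lemma pv_tri_step (q : Int) : q * (q + 1) / 2 - (q - 1) * q / 2 = q := by
  have h : q * (q + 1) = (q - 1) * q + q * 2 := by ring
  rw [h, Int.add_mul_ediv_right _ _ (by norm_num : (2:Int) ≠ 0)]
  omega

lemma pv_ediv_of_decomp {K q r c : Int} (hK : 0 < K) (hr0 : 0 ≤ r) (hrK : r < K)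
    (hc : c = K * q + r) : c / K = q := by
  subst hc
  rw [add_comm, Int.add_mul_ediv_left _ _ (by omega : K ≠ 0),
      Int.ediv_eq_zero_of_lt hr0 hrK]
  omega

-- the step, stated over K = |k| directly
lemma pvF_core (K c : Int) (hK : 0 < K) :
    c * (c + 1) / 2 - K * ((c / K) * (c / K + 1) / 2)
      = (c - 1) * c / 2 - K * (((c - 1) / K) * ((c - 1) / K + 1) / 2)
        + (if K ∣ c then 0 else c) := by
  have e1 : c * (c + 1) / 2 = (c - 1) * c / 2 + c := by have := pv_tri_step c; omega
  have hr0 : 0 ≤ c % K := Int.emod_nonneg c (by omega)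
  have hrK : c % K < K := Int.emod_lt_of_pos c hK
  have hdecomp : K * (c / K) + c % K = c := Int.mul_ediv_add_emod c K
  by_cases hdvd : K ∣ c
  · have hrz : c % K = 0 := Int.emod_eq_zero_of_dvd hdvd
    have hprev : (c - 1) / K = c / K - 1 :=
      pv_ediv_of_decomp (q := c / K - 1) (r := K - 1) hK (by omega) (by omega)
        (by rw [mul_sub, mul_one]; omega)
    have hKq : K * (c / K) = c := by omega
    have e2 : (c / K) * (c / K + 1) / 2 = (c / K - 1) * (c / K) / 2 + c / K := by
      have := pv_tri_step (c / K); omega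
    rw [if_pos hdvd, hprev, show c / K - 1 + 1 = c / K from by ring, e1, e2]
    linear_combination -hKq
  · have hrz : c % K ≠ 0 := fun h => hdvd (Int.dvd_of_emod_eq_zero h)
    have hprev : (c - 1) / K = c / K :=
      pv_ediv_of_decomp (q := c / K) (r := c % K - 1) hK (by omega) (by omega) (by omega)
    rw [if_neg hdvd, hprev, e1]; ring

-- pvF increases by c at non-multiples of |k|, stays put at multiples
lemma pvF_step (k c : Int) (hk : k ≠ 0) (_hc : 1 ≤ c) :
    pvF k c = pvF k (c - 1) + (if |k| ∣ c then 0 else c) := by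
  unfold pvF
  rw [show c - 1 + 1 = c from by ring]
  exact pvF_core |k| c (abs_pos.mpr hk)

lemma pv_loop_eq (n k : Int) (hk : k ≠ 0) :
    ∀ (fuel : Nat) (c t : Int), fuel = (n + 1 - c).toNat → 1 ≤ c → c ≤ n + 1 →
      skipLoop n k c t = t + pvF k n - pvF k (c - 1) := by
  intro fuel
  induction fuel with
  | zero =>
    intro c t hf h1 h2
    have hcn : ¬ c ≤ n := by omega
    rw [skipLoop, dif_neg hcn]
    have : c - 1 = n := by omega
    rw [this]; ring
  | succ m ih =>
    intro c t hf h1 h2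
    have hcn : c ≤ n := by omega
    have hmod : PySem.Int.mod c k = 0 ↔ k ∣ c := PySem.Int.mod_eq_zero_iff_dvd c k
    have hstep := pvF_step k c hk h1
    rw [skipLoop, dif_pos hcn]
    by_cases hd : PySem.Int.mod c k = 0
    · have hdvd : |k| ∣ c := (abs_dvd k c).mpr (hmod.mp hd)
      rw [if_pos hd, ih (c + 1) t (by omega) (by omega) (by omega)]
      simp only [add_sub_cancel_right]
      rw [hstep, if_pos hdvd]; ring
    · have hdvd : ¬ |k| ∣ c := fun h => hd (hmod.mpr ((abs_dvd k c).mp h))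
      rw [if_neg hd, ih (c + 1) (t + c) (by omega) (by omega) (by omega)]
      simp only [add_sub_cancel_right]
      rw [hstep, if_neg hdvd]; ring

-- ===== VERDICT (by name: the statement is the Claim_ definition above) =====
theorem skip_multiples_spec : Claim_equal_skip_multiples := by
  intro n k _dom hpre
  unfold Spec_skip_multiples skip_multiples skip_multiples_alt
  by_cases hn : n < 1
  · rw [skipLoop, dif_neg (by omega), if_pos hn]
  · have hk : k ≠ 0 := by
      rcases hpre with h | h
      · exact h
      · omega
    have hK : (0:Int) < |k| := abs_pos.mpr hk
    rw [if_neg hn]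
    rw [pv_loop_eq n k hk (n + 1 - 1).toNat 1 0 (by omega) (by omega) (by omega)]
    have hF0 : pvF k 0 = 0 := by simp [pvF]
    simp only [show (1:Int) - 1 = 0 from rfl, hF0, sub_zero, zero_add]
    rw [PySem.Int.floordiv_eq_ediv_of_pos hK,
        PySem.Int.floordiv_eq_ediv_of_pos (by norm_num : (0:Int) < 2),
        PySem.Int.floordiv_eq_ediv_of_pos (by norm_num : (0:Int) < 2)]
    rfl
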